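-- pv_equiv track=rewrite | github.com/fffredericky/Skool_project | network_functions.py | invert_network
-- ===== SOURCE A (Python) =====
-- from typing import List, Tuple, Dict, TextIO
--
-- def invert_network(person_to_networks: Dict[str, List[str]]) -> Dict[str, List[str]]:
--     """Return a "network to people" dictionary based on person_to_networks.
--     The values in the dictionary are sorted alphabetically.
--
--     >>> invert_network({'a b': 'X', 'a c': 'Y', 'a d': 'X'})
--     {'X': ['a b', 'a d'], 'Y': ['a c']}
--     """
--     networkdic = {}
--     for name in person_to_networks:
--         for network in person_to_networks[name]:
--             if not network in networkdic:
--                 networkdic[network] = [name]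
--             else:
--                 networkdic[network].append(name)
--     for item in networkdic:
--         networkdic[item].sort()
--     return networkdic
-- ===== SOURCE B (Python) =====
-- def invert_network(person_to_networks):
--     # Pre-register every network once (first-occurrence order), then append
--     # people in alphabetical order so each list is born sorted: no final sort pass.
--     networkdic = {net: [] for nets in person_to_networks.values() for net in nets}
--     for name in sorted(person_to_networks):
--         for net in person_to_networks[name]:
--             networkdic[net].append(name)
--     return networkdic
-- ===== Notes on version B (the rewrite author's own statement) =====
-- stated objective: alternative
-- what changed: B pre-registers every network once (first-occurrence order) via a comprehension, then appends people in alphabetical order so each network's list is built already sorted, eliminating A's final per-list sort pass.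
import Mathlib
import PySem

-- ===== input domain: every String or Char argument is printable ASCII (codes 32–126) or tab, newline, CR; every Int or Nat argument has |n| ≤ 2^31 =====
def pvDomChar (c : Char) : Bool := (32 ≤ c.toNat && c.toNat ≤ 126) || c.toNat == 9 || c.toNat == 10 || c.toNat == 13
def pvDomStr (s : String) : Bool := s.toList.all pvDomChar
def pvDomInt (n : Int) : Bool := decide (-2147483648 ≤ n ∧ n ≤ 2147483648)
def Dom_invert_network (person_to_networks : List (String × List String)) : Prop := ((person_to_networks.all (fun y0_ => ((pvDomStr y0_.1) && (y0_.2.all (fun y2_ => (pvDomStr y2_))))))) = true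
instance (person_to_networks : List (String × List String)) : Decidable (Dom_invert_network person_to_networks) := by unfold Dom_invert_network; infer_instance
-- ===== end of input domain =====

-- B pre-registers each network once (first-occurrence order) and appends people in
-- alphabetical order, so every list is built already sorted and the final per-list
-- sort pass of A disappears (objective: alternative decomposition, same cost class).

-- ===== PORT A =====
def invert_network (person_to_networks : List (String × List String)) : List (String × List String) :=
  let src := PySem.Dict.ofList person_to_networks
  let networkdic := src.keys.foldl (fun d name =>
    (src.getD name []).foldl (fun d network =>
      if d.contains network = false then d.insert network [name]
      else d.modify network [] (fun l => l ++ [name])) d) PySem.Dict.empty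
  let networkdic2 := networkdic.keys.foldl (fun d item =>
    d.modify item [] (fun l => PySem.List.sorted l (fun x => x) false)) networkdic
  networkdic2.items

-- ===== PORT B =====
def invert_network_alt (person_to_networks : List (String × List String)) : List (String × List String) :=
  let src := PySem.Dict.ofList person_to_networks
  let networkdic := src.values.foldl (fun d nets =>
    nets.foldl (fun d net => d.insert net ([] : List String)) d) PySem.Dict.empty
  let networkdic2 := (PySem.List.sorted src.keys (fun x => x) false).foldl (fun d name =>
    (src.getD name []).foldl (fun d net => d.modify net [] (fun l => l ++ [name])) d) networkdic
  networkdic2.items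

-- ===== PRECONDITION & SPEC =====
def Spec_invert_network (person_to_networks : List (String × List String)) (out : List (String × List String)) : Prop := out = invert_network_alt person_to_networks
instance (person_to_networks : List (String × List String)) (out : List (String × List String)) : Decidable (Spec_invert_network person_to_networks out) := by unfold Spec_invert_network; infer_instance

-- ===== CLAIM (what is proved, stated in full; the proofs are below) =====
def Claim_equal_invert_network : Prop := ∀ (person_to_networks : List (String × List String)), Dom_invert_network person_to_networks → Spec_invert_network person_to_networks (invert_network person_to_networks)

-- ===== LEMMAS AND PROOFS =====

-- the (network, name) stream a pass over persons `ks` generates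
def pvStream (src : PySem.Dict String (List String)) (ks : List String) : List (String × String) :=
  ks.flatMap (fun name => (src.getD name []).map (fun net => (net, name)))

-- the grouping loop both ports share: append p.2 to the list at key p.1
def pvBuild (d : PySem.Dict String (List String)) (l : List (String × String)) : PySem.Dict String (List String) :=
  l.foldl (fun d p => d.modify p.1 [] (fun v => v ++ [p.2])) d

-- A's insert-or-append branch is exactly Dict.modify (modify inserts f [] on a missing key)
theorem pv_step_eq (d : PySem.Dict String (List String)) (net name : String) :
    (if d.contains net = false then d.insert net [name] else d.modify net [] (fun l => l ++ [name]))
      = d.modify net [] (fun l => l ++ [name]) := by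
  by_cases h : d.contains net
  · simp [h]
  · simp only [Bool.not_eq_true] at h
    simp [h, PySem.Dict.modify, PySem.Dict.getD_of_not_contains d [] h]

theorem pv_keys_build (l : List (String × String)) (d : PySem.Dict String (List String)) :
    (pvBuild d l).keys = PySem.Set.update d.keys (l.map (·.1)) := by
  induction l generalizing d with
  | nil => simp [pvBuild, PySem.Set.update_nil]
  | cons p t ih =>
    simp only [pvBuild, List.foldl_cons, List.map_cons, PySem.Set.update_cons]
    rw [show (List.foldl (fun d p => d.modify p.1 [] (fun v => v ++ [p.2])) (d.modify p.1 [] (fun v => v ++ [p.2])) t) = pvBuild (d.modify p.1 [] (fun v => v ++ [p.2])) t from rfl, ih]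
    congr 1
    rw [PySem.Dict.keys_modify, PySem.Set.add_eq_ite]
    by_cases h : d.contains p.1
    · rw [PySem.Dict.keys_insert_of_contains d _ h, if_pos ((PySem.Dict.contains_iff_mem_keys d p.1).mp h)]
    · simp only [Bool.not_eq_true] at h
      rw [PySem.Dict.keys_insert_of_not_contains d _ h,
        if_neg (fun hm => by simp [(PySem.Dict.contains_iff_mem_keys d p.1).mpr hm] at h)]

-- the sorting pass: getD after sorting every key of `l` once (l nodup)
theorem pv_getD_sortLoop (l : List String) (hl : l.Nodup) (d : PySem.Dict String (List String)) (c : String) :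
    (l.foldl (fun d k => d.modify k [] (fun v => PySem.List.sorted v (fun x => x) false)) d).getD c []
      = if c ∈ l then PySem.List.sorted (d.getD c []) (fun x => x) false else d.getD c [] := by
  induction l generalizing d with
  | nil => simp
  | cons k t ih =>
    simp only [List.foldl_cons, List.nodup_cons] at *
    rw [ih hl.2]
    by_cases hck : c = k
    · subst hck
      rw [if_neg hl.1, if_pos (by simp), PySem.Dict.getD_modify_self]
    · rw [PySem.Dict.getD_modify_of_ne d [] _ hck]
      by_cases hct : c ∈ t <;> simp [hct, hck]

-- values of the all-[] dict
theorem pv_getD_insertNil (l : List String) (d : PySem.Dict String (List String))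
    (hd : ∀ c, d.getD c [] = []) (c : String) :
    (l.foldl (fun d x => d.insert x ([] : List String)) d).getD c [] = [] := by
  induction l generalizing d with
  | nil => exact hd c
  | cons k t ih =>
    simp only [List.foldl_cons]
    exact ih _ (fun c => by rw [PySem.Dict.getD_insert]; split <;> simp [hd])

-- a Set.update that adds nothing new is the identity
theorem pv_update_of_subset (s : PySem.Set String) (l : List String) (h : ∀ x ∈ l, x ∈ s) :
    PySem.Set.update s l = s := by
  rw [PySem.Set.update_eq_append_filter]
  have : List.filter (fun y => !PySem.Set.contains s y) (PySem.Set.ofList l) = [] := by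
    rw [List.filter_eq_nil_iff]
    intro a ha
    simpa using h a ((PySem.Set.mem_ofList l a).mp ha)
  rw [this, List.append_nil]

-- two dicts with the same nodup key list and the same getD have the same items
theorem pv_items_eq (dX dY : PySem.Dict String (List String))
    (h1 : dX.keys = dY.keys) (hn : dX.keys.Nodup)
    (h2 : ∀ k, dX.getD k [] = dY.getD k []) : dX.items = dY.items := by
  have hlen : dX.items.length = dY.items.length := by
    have := congrArg List.length h1
    simpa [PySem.Dict.keys] using this
  apply List.ext_getElem hlen
  intro i hi hi'
  have hkX : dX.keys[i]'(by simpa [PySem.Dict.keys] using hi) = dX.items[i].1 := by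
    simp [PySem.Dict.keys]
  have hkY : dY.keys[i]'(by simpa [PySem.Dict.keys] using hi') = dY.items[i].1 := by
    simp [PySem.Dict.keys]
  have hfst : dX.items[i].1 = dY.items[i].1 := by
    rw [← hkX, ← hkY]; congr 1
  have hvX : dX.getD dX.items[i].1 [] = dX.items[i].2 :=
    PySem.Dict.getD_of_mem_items dX (by simp) hn []
  have hvY : dY.getD dY.items[i].1 [] = dY.items[i].2 :=
    PySem.Dict.getD_of_mem_items dY (by simp) (h1 ▸ hn) []
  have : dX.items[i].2 = dY.items[i].2 := by
    rw [← hvX, h2, hfst, hvY]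
  exact Prod.ext hfst this

-- on a nodup-keyed dict, looking every key up reads off the values
theorem pv_keys_map_getD (d : PySem.Dict String (List String)) (hn : d.keys.Nodup) :
    d.keys.map (fun k => d.getD k []) = d.values := by
  apply List.ext_getElem (by simp [PySem.Dict.keys, PySem.Dict.values])
  intro i hi hi'
  have hi2 : i < d.items.length := by simpa [PySem.Dict.values] using hi'
  have hk : (d.keys.map (fun k => d.getD k []))[i] = d.getD d.items[i].1 [] := by
    simp [PySem.Dict.keys]
  have hv := PySem.Dict.getD_of_mem_items d (k := d.items[i].1) (v := d.items[i].2)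
    (by simp) hn ([] : List String)
  rw [hk, hv]
  simp [PySem.Dict.values]

-- one person's block of the stream, restricted to network c
theorem pv_block (l : List String) (n c : String) :
    ((l.map (fun net => (net, n))).filter (fun p => p.1 == c)).map (·.2)
      = List.replicate (l.count c) n := by
  induction l with
  | nil => simp
  | cons x t ih =>
    by_cases h : x = c
    · subst h; simp [ih, List.replicate_succ]
    · simp [h, ih]

-- the per-network people list a pass over persons `ks` produces
theorem pv_filter_stream (src : PySem.Dict String (List String)) (ks : List String) (c : String) :
    ((pvStream src ks).filter (fun p => p.1 == c)).map (·.2)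
      = ks.flatMap (fun n => List.replicate ((src.getD n []).count c) n) := by
  simp only [pvStream, List.filter_flatMap, List.map_flatMap]
  exact List.flatMap_congr (fun n _ => pv_block _ n c)

theorem pv_fst_stream (src : PySem.Dict String (List String)) (ks : List String) :
    (pvStream src ks).map (·.1) = ks.flatMap (fun n => src.getD n []) := by
  simp [pvStream, List.map_flatMap, Function.comp_def]

-- sorting the concatenation of constant blocks = concatenating them in sorted order
theorem pv_sorted_flatMap (ks : List String) (cnt : String → Nat) :
    PySem.List.sorted (ks.flatMap (fun n => List.replicate (cnt n) n)) (fun x => x) false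
      = (PySem.List.sorted ks (fun x => x) false).flatMap (fun n => List.replicate (cnt n) n) := by
  apply PySem.List.sorted_id_eq_of_perm_of_pairwise
  · exact List.Perm.flatMap (PySem.List.sorted_perm ks _ false) (fun a _ => List.Perm.refl _)
  · rw [List.pairwise_flatMap]
    constructor
    · intro a _
      exact List.Pairwise.imp (by rintro x y ⟨⟩; exact le_refl _) (List.pairwise_replicate.mpr (Or.inr rfl))
    · refine List.Pairwise.imp ?_ (PySem.List.sorted_pairwise ks (fun x => x))
      intro a b hab x hx y hy
      rw [List.eq_of_mem_replicate hx, List.eq_of_mem_replicate hy]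
      exact hab

-- ===== VERDICT (by name: the statement is the Claim_ definition above) =====
theorem invert_network_spec : Claim_equal_invert_network := by
  intro p _
  unfold Spec_invert_network invert_network invert_network_alt
  simp only []
  set src := PySem.Dict.ofList p with hsrc
  have hnk : src.keys.Nodup := PySem.Dict.nodup_keys_ofList p
  -- canonical names
  set base : List String := src.keys.flatMap (fun n => src.getD n []) with hbase
  -- A phase 1 as pvBuild of the stream
  have hA1 : (src.keys.foldl (fun d name =>
      (src.getD name []).foldl (fun d network =>
        if d.contains network = false then d.insert network [name]
        else d.modify network [] (fun l => l ++ [name])) d) PySem.Dict.empty)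
      = pvBuild PySem.Dict.empty (pvStream src src.keys) := by
    rw [pvBuild, pvStream, List.foldl_flatMap]
    congr 1
    funext d name
    rw [List.foldl_map]
    congr 1
    funext d' net
    exact pv_step_eq d' net name
  set d1 := pvBuild PySem.Dict.empty (pvStream src src.keys) with hd1
  -- A phase 1 keys and values
  have hk1 : d1.keys = PySem.Set.ofList base := by
    rw [hd1, pv_keys_build, pv_fst_stream, PySem.Dict.keys_empty, hbase]
    exact PySem.Set.update_empty _
  have hv1 : ∀ c, d1.getD c [] = ((pvStream src src.keys).filter (fun q : String × String => q.1 == c)).map (·.2) := by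
    intro c
    rw [hd1, pvBuild, PySem.Dict.getD_foldl_modify_append, PySem.Dict.getD_empty]
    simp
  -- B phase 1 (the comprehension): keys = base as a set, all values []
  have hflat : src.values.foldl (fun d nets =>
      nets.foldl (fun d net => d.insert net ([] : List String)) d) PySem.Dict.empty
      = base.foldl (fun d net => d.insert net ([] : List String)) PySem.Dict.empty := by
    rw [hbase, List.flatMap_def, ← pv_keys_map_getD src hnk]
    rw [← List.foldl_flatMap, List.flatMap_id']
  set d0 := base.foldl (fun d net => d.insert net ([] : List String)) PySem.Dict.empty with hd0
  have hk0 : d0.keys = PySem.Set.ofList base := by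
    rw [hd0, PySem.Dict.keys_foldl_insert base (fun _ _ => []) PySem.Dict.empty,
      PySem.Dict.keys_empty]
    exact PySem.Set.update_empty _
  have hv0 : ∀ c, d0.getD c [] = [] :=
    pv_getD_insertNil base PySem.Dict.empty (fun c => PySem.Dict.getD_empty c []) 
  -- B phase 2
  have hB2 : ((PySem.List.sorted src.keys (fun x => x) false).foldl (fun d name =>
      (src.getD name []).foldl (fun d net => d.modify net [] (fun l => l ++ [name])) d) d0)
      = pvBuild d0 (pvStream src (PySem.List.sorted src.keys (fun x => x) false)) := by
    rw [pvBuild, pvStream, List.foldl_flatMap]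
    congr 1
    funext d name
    rw [List.foldl_map]
  set ks' := PySem.List.sorted src.keys (fun x => x) false with hks'
  set dB := pvBuild d0 (pvStream src ks') with hdB
  have hmem_base : ∀ x ∈ (pvStream src ks').map (·.1), x ∈ PySem.Set.ofList base := by
    intro x hx
    rw [pv_fst_stream] at hx
    rw [PySem.Set.mem_ofList]
    obtain ⟨n, hn, hxn⟩ := List.mem_flatMap.mp hx
    exact List.mem_flatMap.mpr ⟨n, (PySem.List.mem_sorted src.keys _ false n).mp hn, hxn⟩
  have hkB : dB.keys = PySem.Set.ofList base := by
    rw [hdB, pv_keys_build, hk0, pv_update_of_subset _ _ (fun x hx => hmem_base x hx)]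
  have hvB : ∀ c, dB.getD c [] = ((pvStream src ks').filter (fun q : String × String => q.1 == c)).map (·.2) := by
    intro c
    rw [hdB, pvBuild, PySem.Dict.getD_foldl_modify_append, hv0]
    simp
  -- A phase 2
  set d2 := d1.keys.foldl (fun d item =>
    d.modify item [] (fun l => PySem.List.sorted l (fun x => x) false)) d1 with hd2
  have hk2 : d2.keys = d1.keys := by
    rw [hd2, PySem.Dict.keys_foldl_modify d1.keys [] (fun _ _ v => PySem.List.sorted v (fun x => x) false) d1]
    exact pv_update_of_subset _ _ (fun x hx => hx)
  have hnk1 : d1.keys.Nodup := by rw [hk1]; exact PySem.Set.nodup_ofList base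
  have hv2 : ∀ c, d2.getD c [] = if c ∈ d1.keys then PySem.List.sorted (d1.getD c []) (fun x => x) false else d1.getD c [] := by
    intro c
    rw [hd2]
    exact pv_getD_sortLoop d1.keys hnk1 d1 c
  -- assemble
  rw [hA1, hflat, hB2, ← hd2]
  apply pv_items_eq
  · rw [hk2, hk1, hkB]
  · rw [hk2]; exact hnk1
  · intro c
    rw [hv2, hvB, hv1, pv_filter_stream, pv_filter_stream, hk1]
    by_cases hc : c ∈ PySem.Set.ofList base
    · rw [if_pos hc]
      exact pv_sorted_flatMap src.keys (fun n => (src.getD n []).count c)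
    · rw [if_neg hc]
      have hno : ∀ n ∈ src.keys, (src.getD n []).count c = 0 := by
        intro n hn
        rw [List.count_eq_zero]
        intro hcn
        exact hc ((PySem.Set.mem_ofList base c).mpr (List.mem_flatMap.mpr ⟨n, hn, hcn⟩))
      have h1 : src.keys.flatMap (fun n => List.replicate ((src.getD n []).count c) n) = [] := by
        rw [List.flatMap_eq_nil_iff]
        intro n hn; rw [hno n hn]; rfl
      have h2 : ks'.flatMap (fun n => List.replicate ((src.getD n []).count c) n) = [] := by
        rw [List.flatMap_eq_nil_iff]
        intro n hn
        rw [hno n ((PySem.List.mem_sorted src.keys _ false n).mp hn)]; rfl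
      rw [h1, h2]
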